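-- pv_equiv track=rewrite | github.com/ABI-Software/sparc-discover-elastic-testing | tests/slow_tests/segmentation_tests.py | generate_redundant_detail
-- ===== SOURCE A (Python) =====
-- def generate_redundant_detail(paths):
--     redundant_detail = {}
--
--     for path in paths:
--         filename = path.split('/')[-1]
--         folder_path = f"files/{path[:path.rfind('/')]}"
--         if folder_path in redundant_detail:
--             redundant_detail[folder_path].append(filename)
--         else:
--             redundant_detail[folder_path] = [filename]
--
--     return redundant_detail
-- ===== SOURCE B (Python) =====
-- def generate_redundant_detail(paths):
--     pairs = [(f"files/{p[:p.rfind('/')]}", p.split('/')[-1]) for p in paths]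
--     return {k: [f for k2, f in pairs if k2 == k] for k, _ in pairs}
-- ===== Notes on version B (the rewrite author's own statement) =====
-- stated objective: alternative
-- what changed: Replaces A's single-pass dict mutation (membership test + append-or-create per path) with a two-phase decomposition: first materialise all (folder, filename) pairs, then build the whole dict in one comprehension whose value for each key is computed in one shot by filtering the pair list.
import Mathlib
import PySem

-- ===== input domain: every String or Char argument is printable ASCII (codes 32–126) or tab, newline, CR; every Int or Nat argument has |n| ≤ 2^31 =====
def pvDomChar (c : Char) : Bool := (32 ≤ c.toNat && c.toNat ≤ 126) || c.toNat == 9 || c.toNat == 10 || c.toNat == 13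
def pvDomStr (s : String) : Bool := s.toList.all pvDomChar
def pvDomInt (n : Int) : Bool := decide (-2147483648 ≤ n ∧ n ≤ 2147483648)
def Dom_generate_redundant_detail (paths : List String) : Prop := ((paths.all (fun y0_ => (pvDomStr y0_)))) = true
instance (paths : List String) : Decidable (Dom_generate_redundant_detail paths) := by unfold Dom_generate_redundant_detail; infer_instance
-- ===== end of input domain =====

-- B builds the dict in two phases (materialise all (folder, filename) pairs, then one
-- comprehension whose value per key is a one-shot filter of the pair list) instead of
-- A's single-pass append-or-create dict mutation; objective: alternative decomposition.


-- ===== PORT A =====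
-- filename = path.split('/')[-1]  (split? with '/' is always `some` of a nonempty list,
-- so the two getD defaults are unreachable)
def pvFilename (path : String) : String :=
  ((PySem.List.pyGet? ((PySem.Str.split? path "/").getD []) (-1)).getD "")

-- folder_path = f"files/{path[:path.rfind('/')]}"
def pvFolderPath (path : String) : String :=
  "files/" ++ PySem.Str.slice path none (some (PySem.Str.rfind path "/"))

def generate_redundant_detail (paths : List String) : List (String × List String) :=
  (paths.foldl (fun d path =>
      let filename := pvFilename path
      let folder_path := pvFolderPath path
      if d.contains folder_path then
        d.modify folder_path [] (fun l => l ++ [filename])   -- redundant_detail[folder_path].append(filename)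
      else
        d.insert folder_path [filename])
    PySem.Dict.empty).items

-- ===== PORT B =====
def generate_redundant_detail_alt (paths : List String) : List (String × List String) :=
  let pairs := paths.map (fun p => (pvFolderPath p, pvFilename p))
  (pairs.foldl (fun d kp =>
      d.insert kp.1 ((pairs.filter (fun q => q.1 == kp.1)).map (·.2)))
    PySem.Dict.empty).items

-- ===== PRECONDITION & SPEC =====
def Spec_generate_redundant_detail (paths : List String) (out : List (String × List String)) : Prop := out = generate_redundant_detail_alt paths
instance (paths : List String) (out : List (String × List String)) : Decidable (Spec_generate_redundant_detail paths out) := by unfold Spec_generate_redundant_detail; infer_instance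

-- ===== CLAIM (what is proved, stated in full; the proofs are below) =====
def Claim_equal_generate_redundant_detail : Prop := ∀ (paths : List String), Dom_generate_redundant_detail paths → Spec_generate_redundant_detail paths (generate_redundant_detail paths)

-- ===== LEMMAS AND PROOFS =====

-- A's if-branches are exactly Dict.modify (append-or-create)
theorem aStep_eq_modify (d : PySem.Dict String (List String)) (k f : String) :
    (if d.contains k then d.modify k [] (fun l => l ++ [f]) else d.insert k [f])
      = d.modify k [] (fun l => l ++ [f]) := by
  by_cases h : d.contains k = true
  · simp [h]
  · simp only [Bool.not_eq_true] at h
    simp [h, PySem.Dict.modify, PySem.Dict.getD_of_not_contains _ _ h]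

-- B's insert loop: the value inserted at a key depends only on the key, so the final
-- lookup at k is the common value whenever k occurs among the keys
theorem get?_foldl_insert_keyfun (V : String → List String)
    (l : List (String × String)) (d : PySem.Dict String (List String)) (k : String) :
    (l.foldl (fun d kp => d.insert kp.1 (V kp.1)) d).get? k
      = if k ∈ l.map (·.1) then some (V k) else d.get? k := by
  induction l generalizing d with
  | nil => simp
  | cons p t ih =>
    simp only [List.foldl_cons, List.map_cons, List.mem_cons, ih]
    by_cases hk : k ∈ t.map (·.1)
    · simp [hk]
    · by_cases he : k = p.1 <;> simp [hk, he, PySem.Dict.get?_insert]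

theorem generate_redundant_detail_eq (paths : List String) :
    generate_redundant_detail paths = generate_redundant_detail_alt paths := by
  unfold generate_redundant_detail generate_redundant_detail_alt
  set pairs := paths.map (fun p => (pvFolderPath p, pvFilename p)) with hpairs
  -- rewrite A's fold over paths as a fold over pairs
  have hA : paths.foldl (fun d path =>
      let filename := pvFilename path
      let folder_path := pvFolderPath path
      if d.contains folder_path then
        d.modify folder_path [] (fun l => l ++ [filename])
      else
        d.insert folder_path [filename]) PySem.Dict.empty
      = pairs.foldl (fun d kp => d.modify kp.1 [] (fun l => l ++ [kp.2])) PySem.Dict.empty := by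
    rw [hpairs, List.foldl_map]
    apply PySem.List.foldl_congr_mem
    intro d p _
    exact aStep_eq_modify d (pvFolderPath p) (pvFilename p)
  rw [hA]
  set dA := pairs.foldl (fun d kp => d.modify kp.1 [] (fun l => l ++ [kp.2])) PySem.Dict.empty with hdA
  set V : String → List String := fun k => (pairs.filter (fun q => q.1 == k)).map (·.2) with hV
  set dB := pairs.foldl (fun d kp => d.insert kp.1 (V kp.1)) PySem.Dict.empty with hdB
  -- same key lists
  have hkA : dA.keys = PySem.Set.update PySem.Dict.empty.keys (pairs.map (·.1)) :=
    PySem.Dict.keys_foldl_modify_key (key := (·.1)) (l := pairs) (d0 := [])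
      (f := fun _ kp => fun l => l ++ [kp.2]) (d := PySem.Dict.empty)
  have hkB : dB.keys = PySem.Set.update PySem.Dict.empty.keys (pairs.map (·.1)) :=
    PySem.Dict.keys_foldl_insert_key (key := (·.1)) (l := pairs)
      (f := fun _ kp => V kp.1) (d := PySem.Dict.empty)
  have hkeys : dA.keys = dB.keys := hkA.trans hkB.symm
  have hndA : dA.keys.Nodup :=
    PySem.Dict.nodup_keys_foldl_modify_key pairs (·.1) [] (fun _ kp => fun l => l ++ [kp.2])
      PySem.Dict.empty PySem.Dict.nodup_keys_empty
  have hndB : dB.keys.Nodup := hkeys ▸ hndA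
  -- lookups agree on every key of the dicts
  have hmem : ∀ k, k ∈ dB.keys → k ∈ pairs.map (·.1) := by
    intro k hk
    rw [hkB] at hk
    simpa [PySem.Set.mem_update, PySem.Dict.keys_empty] using hk
  have hgetA : ∀ k, dA.getD k [] = V k := by
    intro k
    rw [hdA, PySem.Dict.getD_foldl_modify_append]
    simp [hV]
  have hget : ∀ k, k ∈ dB.keys → dA.getD k [] = dB.getD k [] := by
    intro k hk
    have hB : dB.get? k = some (V k) := by
      rw [hdB, get?_foldl_insert_keyfun]
      simp [hmem k hk]
    rw [hgetA k, PySem.Dict.getD_eq_get?_getD, hB]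
    rfl
  -- conclude item-list equality
  rw [PySem.Dict.items_eq_map_keys dA hndA ([] : List String),
      PySem.Dict.items_eq_map_keys dB hndB ([] : List String), hkeys]
  exact List.map_congr_left (fun k hk => by rw [hget k hk])

-- ===== VERDICT (by name: the statement is the Claim_ definition above) =====
theorem generate_redundant_detail_spec : Claim_equal_generate_redundant_detail := by
  intro paths _
  exact generate_redundant_detail_eq paths
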